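-- pv_equiv track=rewrite | github.com/cmchetanm/ai-sales-agent | apps/llm_service/app/routes_chat.py | _extract_filters_from_messages
-- ===== SOURCE A (Python) =====
-- from typing import List, Dict, Optional
--
-- def _extract_filters_from_messages(messages: List[Dict]) -> Dict[str, str]:
--     """Heuristically infer filters from the full user history.
--
--     Looks across the conversation for role/location/industry hints so that
--     short confirmations like "ok" or "go ahead" still trigger discovery.
--     """
--     role = ''
--     location = ''
--     kw: list[str] = []
--     for m in messages:
--         if m.get('role') != 'user':
--             continue
--         text = (m.get('content') or '').lower()
--         if not role and ('cto' in text or 'chief technology officer' in text or 'head of engineering' in text):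
--             role = 'cto'
--         if not location and any(token in text for token in [' us', 'united states', 'usa', ' in us', ' across the us']):
--             location = 'us'
--         if any(word in text for word in ['it', 'software', 'saas', 'tech industry', 'technology']):
--             kw.extend(['it', 'software', 'saas'])
--     keywords = ' '.join(sorted(set(kw)))
--     return {"role": role, "location": location, "keywords": keywords}
-- ===== SOURCE B (Python) =====
-- def _extract_filters_from_messages(messages):
--     texts = [(m.get('content') or '').lower() for m in messages if m.get('role') == 'user']
--     role = 'cto' if any(p in t for t in texts
--                         for p in ('cto', 'chief technology officer', 'head of engineering')) else ''
--     location = 'us' if any(p in t for t in texts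
--                            for p in (' us', 'united states', 'usa', ' in us', ' across the us')) else ''
--     keywords = 'it saas software' if any(p in t for t in texts
--                                          for p in ('it', 'software', 'saas', 'tech industry', 'technology')) else ''
--     return {"role": role, "location": location, "keywords": keywords}
-- ===== Notes on version B (the rewrite author's own statement) =====
-- stated objective: simpler
-- what changed: Replaces the single interleaved loop with mutated role/location/kw accumulators (and a sort-dedup-join of repeatedly extended keyword triples) by one filter of the user texts followed by three independent any() checks, each yielding its constant string directly.
import Mathlib
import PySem

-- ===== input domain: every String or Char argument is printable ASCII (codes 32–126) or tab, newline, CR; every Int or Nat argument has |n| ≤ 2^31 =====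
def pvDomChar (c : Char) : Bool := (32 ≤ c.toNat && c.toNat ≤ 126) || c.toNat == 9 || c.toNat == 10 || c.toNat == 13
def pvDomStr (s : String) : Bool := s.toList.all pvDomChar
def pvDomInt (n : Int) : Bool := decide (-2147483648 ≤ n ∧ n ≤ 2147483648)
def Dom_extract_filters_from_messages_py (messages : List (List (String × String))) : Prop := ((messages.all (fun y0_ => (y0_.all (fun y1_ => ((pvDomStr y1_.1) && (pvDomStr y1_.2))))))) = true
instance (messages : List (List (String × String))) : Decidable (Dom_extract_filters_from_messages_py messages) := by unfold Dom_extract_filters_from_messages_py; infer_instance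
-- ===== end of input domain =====

-- B replaces A's interleaved accumulator loop by a filter of user texts and three independent any-checks; objective: simpler.


-- ===== PORT A =====
-- A's loop over messages, carrying (role, location, kw) exactly as the Python mutates them
def pv_loopA : List (List (String × String)) → String → String → List String → String × String × List String
  | [], r, l, k => (r, l, k)
  | m :: rest, r, l, k =>
    if (PySem.Dict.ofList m).get? "role" ≠ some "user" then pv_loopA rest r l k
    else
      let text := PySem.Str.lower (((PySem.Dict.ofList m).get? "content").getD "")
      pv_loopA rest
        (if r == "" && (PySem.Str.isIn "cto" text || PySem.Str.isIn "chief technology officer" text || PySem.Str.isIn "head of engineering" text) then "cto" else r)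
        (if l == "" && ([" us", "united states", "usa", " in us", " across the us"].any (fun tok => PySem.Str.isIn tok text)) then "us" else l)
        (if ["it", "software", "saas", "tech industry", "technology"].any (fun w => PySem.Str.isIn w text) then k ++ ["it", "software", "saas"] else k)

def extract_filters_from_messages_py (messages : List (List (String × String))) : List (String × String) :=
  let st := pv_loopA messages "" "" []
  let keywords := PySem.Str.join " " (PySem.List.sorted (PySem.Set.ofList st.2.2) (fun x => x) false)
  [("role", st.1), ("location", st.2.1), ("keywords", keywords)]

-- ===== PORT B =====
def pv_userTexts (messages : List (List (String × String))) : List String :=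
  (messages.filter (fun m => (PySem.Dict.ofList m).get? "role" == some "user")).map
    (fun m => PySem.Str.lower (((PySem.Dict.ofList m).get? "content").getD ""))

def pv_anyHit (texts : List String) (phrases : List String) : Bool :=
  texts.any (fun t => phrases.any (fun p => PySem.Str.isIn p t))

def extract_filters_from_messages_py_alt (messages : List (List (String × String))) : List (String × String) :=
  let texts := pv_userTexts messages
  let role := if pv_anyHit texts ["cto", "chief technology officer", "head of engineering"] then "cto" else ""
  let location := if pv_anyHit texts [" us", "united states", "usa", " in us", " across the us"] then "us" else ""
  let keywords := if pv_anyHit texts ["it", "software", "saas", "tech industry", "technology"] then "it saas software" else ""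
  [("role", role), ("location", location), ("keywords", keywords)]

-- ===== PRECONDITION & SPEC =====
def Spec_extract_filters_from_messages_py (messages : List (List (String × String))) (out : List (String × String)) : Prop := out = extract_filters_from_messages_py_alt messages
instance (messages : List (List (String × String))) (out : List (String × String)) : Decidable (Spec_extract_filters_from_messages_py messages out) := by unfold Spec_extract_filters_from_messages_py; infer_instance

-- ===== CLAIM (what is proved, stated in full; the proofs are below) =====
def Claim_equal_extract_filters_from_messages_py : Prop := ∀ (messages : List (List (String × String))), Dom_extract_filters_from_messages_py messages → Spec_extract_filters_from_messages_py messages (extract_filters_from_messages_py messages)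

-- ===== LEMMAS AND PROOFS =====

def pv_kwHit (t : String) : Bool := ["it", "software", "saas", "tech industry", "technology"].any (fun w => PySem.Str.isIn w t)

-- one loop step of an accumulator field that is set once: 'if not acc and hit: acc = v'
lemma pv_step_once (r v : String) (c a : Bool) (hv : (v == "") = false) :
    (if ((if (r == "" && c) = true then v else r) == "" && a) = true then v
     else if (r == "" && c) = true then v else r)
    = (if (r == "" && (c || a)) = true then v else r) := by
  by_cases hr : r = "" <;> cases c <;> cases a <;> simp [hr, hv]

-- one loop step of the kw accumulator: extending by the triple = flatMap over one more hit
lemma pv_step_kw (c : Bool) (k L : List String) (t : String) :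
    (if c = true then k ++ ["it", "software", "saas"] else k) ++ L.flatMap (fun _ => ["it", "software", "saas"])
      = k ++ List.flatMap (fun _ => ["it", "software", "saas"]) (if c = true then t :: L else L) := by
  cases c <;> simp

lemma pv_userTexts_cons_user (m : List (String × String)) (rest : List (List (String × String)))
    (hu : (PySem.Dict.ofList m).get? "role" = some "user") :
    pv_userTexts (m :: rest)
      = PySem.Str.lower (((PySem.Dict.ofList m).get? "content").getD "") :: pv_userTexts rest := by
  simp [pv_userTexts, hu]

lemma pv_userTexts_cons_skip (m : List (String × String)) (rest : List (List (String × String)))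
    (hu : ¬ (PySem.Dict.ofList m).get? "role" = some "user") :
    pv_userTexts (m :: rest) = pv_userTexts rest := by
  simp [pv_userTexts, hu]

lemma pv_anyHit_cons (t : String) (ts ph : List String) :
    pv_anyHit (t :: ts) ph = (ph.any (fun p => PySem.Str.isIn p t) || pv_anyHit ts ph) := rfl

lemma pv_roleCond (t : String) :
    (PySem.Str.isIn "cto" t || PySem.Str.isIn "chief technology officer" t || PySem.Str.isIn "head of engineering" t)
      = ["cto", "chief technology officer", "head of engineering"].any (fun p => PySem.Str.isIn p t) := by
  simp [Bool.or_assoc]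

lemma pv_loopA_eq (msgs : List (List (String × String))) (r l : String) (k : List String) :
    pv_loopA msgs r l k =
      ((if r == "" && pv_anyHit (pv_userTexts msgs) ["cto", "chief technology officer", "head of engineering"] then "cto" else r),
       (if l == "" && pv_anyHit (pv_userTexts msgs) [" us", "united states", "usa", " in us", " across the us"] then "us" else l),
       k ++ ((pv_userTexts msgs).filter pv_kwHit).flatMap (fun _ => ["it", "software", "saas"])) := by
  induction msgs generalizing r l k with
  | nil => simp [pv_loopA, pv_userTexts, pv_anyHit]
  | cons m rest ih =>
    by_cases hu : (PySem.Dict.ofList m).get? "role" = some "user"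
    · simp only [pv_loopA, hu, ne_eq, not_true_eq_false, if_false]
      rw [ih, pv_userTexts_cons_user m rest hu]
      simp only [pv_anyHit_cons, List.filter_cons, pv_kwHit, Prod.mk.injEq]
      refine ⟨?_, ?_, ?_⟩
      · rw [pv_roleCond]
        exact pv_step_once r "cto" _ _ (by decide)
      · exact pv_step_once l "us" _ _ (by decide)
      · exact pv_step_kw _ k _ _
    · simp only [pv_loopA, hu, ne_eq, not_false_eq_true, if_true]
      rw [ih, pv_userTexts_cons_skip m rest hu]

lemma pv_sorted_triple : PySem.List.sorted ["it", "software", "saas"] (fun x => x) false = ["it", "saas", "software"] := by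
  apply PySem.List.sorted_eq_of_perm_of_pairwise_lt
  · decide
  · refine List.Pairwise.cons ?_ (List.Pairwise.cons ?_ (List.pairwise_singleton _ _)) <;>
      simp [String.lt_iff_toList_lt] <;> decide

lemma pv_kw_join (l : List String) :
    PySem.Str.join " " (PySem.List.sorted (PySem.Set.ofList (l.flatMap (fun _ => ["it", "software", "saas"]))) (fun x => x) false)
      = if l.isEmpty then "" else "it saas software" := by
  cases l with
  | nil => rfl
  | cons x xs =>
    have hof : PySem.Set.ofList ((x :: xs).flatMap (fun _ => ["it", "software", "saas"]))
        = ["it", "software", "saas"] := by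
      have hsplit : (x :: xs).flatMap (fun _ => ["it", "software", "saas"])
          = ["it", "software", "saas"] ++ xs.flatMap (fun _ => ["it", "software", "saas"]) := by
        simp [List.flatMap_cons]
      rw [hsplit, PySem.Set.ofList_append]
      have h1 : PySem.Set.ofList ["it", "software", "saas"] = ["it", "software", "saas"] := by decide
      rw [h1, PySem.Set.update_eq_append_filter]
      have h2 : (PySem.Set.ofList (xs.flatMap (fun _ => ["it", "software", "saas"]))).filter
          (fun y => !(PySem.Set.contains ["it", "software", "saas"] y)) = [] := by
        rw [List.filter_eq_nil_iff]
        intro y hy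
        have hmem : y ∈ (["it", "software", "saas"] : List String) := by
          rcases List.mem_flatMap.1 ((PySem.Set.mem_ofList _ _).1 hy) with ⟨_, _, hm⟩
          exact hm
        simp only [List.mem_cons, List.not_mem_nil, or_false] at hmem
        rcases hmem with h | h | h <;> rw [h] <;> decide
      rw [h2, List.append_nil]
    rw [hof, pv_sorted_triple]
    simp only [List.isEmpty_cons, Bool.false_eq_true, if_false]
    apply String.toList_injective
    rw [PySem.Str.toList_join]
    decide

lemma pv_isEmpty_filter (p : String → Bool) (xs : List String) :
    (xs.filter p).isEmpty = !xs.any p := by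
  induction xs with
  | nil => rfl
  | cons a t ih => by_cases h : p a = true <;> simp [h, ih]

-- ===== VERDICT (by name: the statement is the Claim_ definition above) =====
theorem extract_filters_from_messages_py_spec : Claim_equal_extract_filters_from_messages_py := by
  unfold Claim_equal_extract_filters_from_messages_py
  intro messages _
  unfold Spec_extract_filters_from_messages_py
  have hB : (pv_userTexts messages).any pv_kwHit
      = pv_anyHit (pv_userTexts messages) ["it", "software", "saas", "tech industry", "technology"] := rfl
  simp only [extract_filters_from_messages_py, extract_filters_from_messages_py_alt,
    pv_loopA_eq, List.nil_append, pv_kw_join, pv_isEmpty_filter, hB]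
  cases h : pv_anyHit (pv_userTexts messages) ["it", "software", "saas", "tech industry", "technology"] <;>
    simp
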